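-- pv_equiv track=rewrite | github.com/YukunGrantZhang/Basic-Data-Structures | VariableHashTableSearch.py | hashingfunction
-- ===== SOURCE A (Python) =====
-- months = ["january", "february", "march", "april", "may", "june", "july", "august", "september", "october", "november", "december"]
--
-- def get_nearest_prime(old_number):
--     largest_prime = 0
--     for num in range(old_number + 1, 2 * old_number) :
--         for i in range(2,num):
--             if num % i == 0:
--                 break
--         else:
--             largest_prime = num
--     return largest_prime
--
-- def hashingfunction(letters):
--     n = len(months)
--
--     buckets = get_nearest_prime(n)
--
--     numbers = []
--     for letter in letters:
--         number = ord(letter) - 96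
--         numbers.append(number)
--
--     total = sum(numbers)
--
--     compression_total = total % buckets
--
--     return compression_total
-- ===== SOURCE B (Python) =====
-- months = ["january", "february", "march", "april", "may", "june", "july", "august", "september", "october", "november", "december"]
--
-- def is_prime(num):
--     for i in range(2, num):
--         if i * i > num:
--             break
--         if num % i == 0:
--             return False
--     return num > 1
--
-- def get_nearest_prime(old_number):
--     # scan the range from the top: first prime found is the largest
--     for num in range(2 * old_number - 1, old_number, -1):
--         if is_prime(num):
--             return num
--     return 0
--
-- def hashingfunction(letters):
--     buckets = get_nearest_prime(len(months))
--     return sum(ord(letter) - 96 for letter in letters) % buckets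
-- ===== Notes on version B (the rewrite author's own statement) =====
-- stated objective: alternative
-- what changed: get_nearest_prime is rewritten: instead of A's ascending scan that keeps the last prime found with full O(n) trial division, B scans the range descending and returns the first prime found, using a sqrt-bounded trial-division primality test; the hash body becomes a single generator-sum instead of building a list.
import Mathlib
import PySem

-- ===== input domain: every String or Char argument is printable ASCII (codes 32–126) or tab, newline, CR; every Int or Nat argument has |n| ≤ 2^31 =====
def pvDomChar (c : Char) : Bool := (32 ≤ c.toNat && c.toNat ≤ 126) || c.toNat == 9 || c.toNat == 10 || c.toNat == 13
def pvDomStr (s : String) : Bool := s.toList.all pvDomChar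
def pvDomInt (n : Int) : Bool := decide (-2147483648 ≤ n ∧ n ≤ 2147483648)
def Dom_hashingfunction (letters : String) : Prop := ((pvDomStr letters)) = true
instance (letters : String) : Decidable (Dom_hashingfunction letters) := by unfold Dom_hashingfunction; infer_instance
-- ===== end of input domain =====

-- B replaces A's O(n) trial division and ascending keep-the-last scan by a √n-bounded
-- primality test and a descending first-hit scan (idiomatic/alternative; same results).

-- ===== PORT A =====
def pvMonths : List String :=
  ["january", "february", "march", "april", "may", "june", "july", "august",
   "september", "october", "november", "december"]

-- inner `for i in range(2, num): if num % i == 0: break / else: largest_prime = num`: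
-- the for-else sets largest_prime exactly when no i in range(2, num) divides num
def getNearestPrimeA (old_number : Int) : Int :=
  (PySem.List.pyRange (old_number + 1) (2 * old_number) 1).foldl
    (fun largest_prime num =>
      if (PySem.List.pyRange 2 num 1).any (fun i => PySem.Int.mod num i == 0) then
        largest_prime
      else num) 0

def hashingfunction (letters : String) : Int :=
  let n : Int := pvMonths.length
  let buckets := getNearestPrimeA n
  let numbers := letters.toList.foldl (fun acc letter => acc ++ [(letter.toNat : Int) - 96]) []
  let total := numbers.sum
  PySem.Int.mod total buckets

-- ===== PORT B =====
-- `for i in range(2, num): if i*i > num: break; if num % i == 0: return False` … `return num > 1`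
def pvTrialB (num : Int) : List Int → Bool
  | [] => decide (num > 1)
  | i :: rest =>
      if i * i > num then decide (num > 1)
      else if PySem.Int.mod num i == 0 then false
      else pvTrialB num rest

def pvIsPrimeB (num : Int) : Bool := pvTrialB num (PySem.List.pyRange 2 num 1)

-- `for num in range(2*old_number - 1, old_number, -1): if is_prime(num): return num` … `return 0`
def pvDescendB : List Int → Int
  | [] => 0
  | num :: rest => if pvIsPrimeB num then num else pvDescendB rest

def getNearestPrimeB (old_number : Int) : Int :=
  pvDescendB (PySem.List.pyRange (2 * old_number - 1) old_number (-1))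

def hashingfunction_alt (letters : String) : Int :=
  let buckets := getNearestPrimeB (pvMonths.length : Int)
  PySem.Int.mod ((letters.toList.map (fun letter => (letter.toNat : Int) - 96)).sum) buckets

-- ===== PRECONDITION & SPEC =====
def Spec_hashingfunction (letters : String) (out : Int) : Prop := out = hashingfunction_alt letters
instance (letters : String) (out : Int) : Decidable (Spec_hashingfunction letters out) := by unfold Spec_hashingfunction; infer_instance

-- ===== CLAIM (what is proved, stated in full; the proofs are below) =====
def Claim_equal_hashingfunction : Prop := ∀ (letters : String), Dom_hashingfunction letters → Spec_hashingfunction letters (hashingfunction letters)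

-- ===== LEMMAS AND PROOFS =====
theorem pv_foldl_append (l : List Char) (init : List Int) :
    l.foldl (fun acc letter => acc ++ [(letter.toNat : Int) - 96]) init
      = init ++ l.map (fun letter => (letter.toNat : Int) - 96) := by
  induction l generalizing init with
  | nil => simp
  | cons c cs ih => simp [List.foldl, ih]

theorem pv_buckets_A : getNearestPrimeA (pvMonths.length : Int) = 23 := by decide
theorem pv_buckets_B : getNearestPrimeB (pvMonths.length : Int) = 23 := by decide

-- ===== VERDICT (by name: the statement is the Claim_ definition above) =====
theorem hashingfunction_spec : Claim_equal_hashingfunction := by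
  intro letters _
  unfold Spec_hashingfunction hashingfunction hashingfunction_alt
  simp only [pv_buckets_A, pv_buckets_B, pv_foldl_append, List.nil_append]
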